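-- pv_equiv track=rewrite | github.com/LetianGong/STCCR | STCCR-main/preprocess/load_data_for_STCCR_TP.py | pad_session_data
-- ===== SOURCE A (Python) =====
-- import itertools
--
-- def pad_session_data(X_session_data1, X_session_data2, X_session_data3, X_session_lengths):
--     '''
--
--     :param X_session_data1:
--     :param X_session_data2:
--     :param X_session_data3:
--     :param X_session_lengths: # (batch, max_length)
--     :return: all_samples_1, all_samples_2, all_samples_3： （batch,）
--     '''
--     max_session_length = int(max([max(_) for _ in X_session_lengths]))  # 找到这个batch中最长的session
--     fillvalue = max_session_length*[0]
--
--     # 将所有sample都处理成等session num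
--     data1_padded_to_same_session_num = list(zip(*itertools.zip_longest(*X_session_data1, fillvalue=fillvalue)))  # 缺少的session都填充为最长长度的session
--     data2_padded_to_same_session_num = list(zip(*itertools.zip_longest(*X_session_data2, fillvalue=fillvalue)))
--     data3_padded_to_same_session_num = list(zip(*itertools.zip_longest(*X_session_data3, fillvalue=fillvalue)))
--
--     # 将所有session padding成最大长度
--     all_samples_1 = []
--     all_samples_2 = []
--     all_samples_3 = []
--
--     for i in range(len(data1_padded_to_same_session_num)):  # 遍历第i个session
--         sample_1 = data1_padded_to_same_session_num[i]
--         padded_sample_1 = list(zip(* itertools.zip_longest(*sample_1, fillvalue=0)))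
--         padded_sample_1 = [list(x) for x in padded_sample_1]
--
--         sample_2 = data2_padded_to_same_session_num[i]
--         padded_sample_2 = list(zip(*itertools.zip_longest(*sample_2, fillvalue=0)))
--         padded_sample_2 = [list(x) for x in padded_sample_2]
--
--         sample_3 = data3_padded_to_same_session_num[i]
--         padded_sample_3 = list(zip(*itertools.zip_longest(*sample_3, fillvalue=0)))
--         padded_sample_3 = [list(x) for x in padded_sample_3]
--
--         if len(padded_sample_1[0]) < max_session_length:
--             padding = (max_session_length-len(padded_sample_1[0]))*[0]
--             for session_1 in padded_sample_1:
--                 session_1.extend(padding)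
--             for session_2 in padded_sample_2:
--                 session_2.extend(padding)
--             for session_3 in padded_sample_3:
--                 session_3.extend(padding)
--
--         all_samples_1.append(padded_sample_1)
--         all_samples_2.append(padded_sample_2)
--         all_samples_3.append(padded_sample_3)
--
--     return all_samples_1, all_samples_2, all_samples_3
-- ===== SOURCE B (Python) =====
-- def pad_session_data(X_session_data1, X_session_data2, X_session_data3, X_session_lengths):
--     max_session_length = int(max(max(row) for row in X_session_lengths))
--     fill = [0] * max_session_length  # empty when max_session_length <= 0
--
--     def even_session_counts(data):
--         num = max((len(sample) for sample in data), default=0)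
--         if num == 0:
--             return []
--         return [[list(sess) for sess in sample] + [list(fill) for _ in range(num - len(sample))]
--                 for sample in data]
--
--     def pad_sample(sample, extra):
--         local_max = max(len(sess) for sess in sample)
--         return [sess + [0] * (local_max - len(sess) + extra) for sess in sample]
--
--     p1 = even_session_counts(X_session_data1)
--     p2 = even_session_counts(X_session_data2)
--     p3 = even_session_counts(X_session_data3)
--
--     out1, out2, out3 = [], [], []
--     for s1, s2, s3 in zip(p1, p2, p3):
--         extra = max(0, max_session_length - max(len(sess) for sess in s1))
--         out1.append(pad_sample(s1, extra))
--         out2.append(pad_sample(s2, extra))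
--         out3.append(pad_sample(s3, extra))
--     return out1, out2, out3
-- ===== Notes on version B (the rewrite author's own statement) =====
-- stated objective: simpler
-- what changed: Replaces A's double zip/zip_longest transpositions plus mutating extend post-pass with a direct construction: pad each stream to a uniform session count, then build every session once by appending the exact number of zeros (stream 1's deficit reused for streams 2/3 as A does).
-- intended difference: On batch samples of stream 2 or 3 whose sessions are all empty and that receive no fill session (the sample already has the maximal session count, or the maximal session length is non-positive), A's double transpose silently collapses the sample to [], dropping its sessions, while B keeps one zero-padded row per session, the intended uniform shape. — e.g. on pad_session_data([[[1]]], [[[]]], [[[1]]], [[1]]): A returns ([[[1]]], [[]], [[[1]]]), B returns ([[[1]]], [[[]]], [[[1]]])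
import Mathlib
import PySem

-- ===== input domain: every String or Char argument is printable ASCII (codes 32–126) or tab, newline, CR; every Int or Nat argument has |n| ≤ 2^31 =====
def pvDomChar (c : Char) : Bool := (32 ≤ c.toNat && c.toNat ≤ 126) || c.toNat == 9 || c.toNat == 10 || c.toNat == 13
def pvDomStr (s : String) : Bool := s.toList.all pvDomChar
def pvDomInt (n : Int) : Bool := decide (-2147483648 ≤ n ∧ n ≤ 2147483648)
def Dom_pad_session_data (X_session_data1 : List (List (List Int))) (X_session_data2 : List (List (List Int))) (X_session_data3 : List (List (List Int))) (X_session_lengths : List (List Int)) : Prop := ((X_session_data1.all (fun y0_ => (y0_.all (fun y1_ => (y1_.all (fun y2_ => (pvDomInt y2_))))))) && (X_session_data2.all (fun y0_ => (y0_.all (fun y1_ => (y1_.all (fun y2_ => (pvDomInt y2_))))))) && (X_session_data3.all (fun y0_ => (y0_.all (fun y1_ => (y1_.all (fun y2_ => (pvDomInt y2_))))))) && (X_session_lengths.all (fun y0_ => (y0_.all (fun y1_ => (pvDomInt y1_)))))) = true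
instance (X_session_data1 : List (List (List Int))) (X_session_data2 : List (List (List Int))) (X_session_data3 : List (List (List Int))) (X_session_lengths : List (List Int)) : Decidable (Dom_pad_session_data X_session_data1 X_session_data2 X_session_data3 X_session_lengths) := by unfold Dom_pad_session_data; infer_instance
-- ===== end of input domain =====

-- B replaces A's double zip/zip_longest transpositions and mutating extend post-pass with a direct
-- per-sample construction (simpler); on all-empty samples of streams 2/3 that get no fill session A
-- drops the sample's sessions ([]) while B keeps one zero-padded row per session (see D_ below).


-- ===== PORT A =====
-- itertools.zip_longest(*rows, fillvalue=fv) as a list of lists (transpose, padding with fv)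
def pyZipLongest {α : Type} (rows : List (List α)) (fv : α) : List (List α) :=
  (List.range (rows.foldl (fun m r => max m r.length) 0)).map
    (fun j => rows.map (fun r => r.getD j fv))

-- zip(*rows) as a list of lists (transpose, truncating to the shortest row; zip() = [])
def pyZip {α : Type} [Inhabited α] (rows : List (List α)) : List (List α) :=
  match rows with
  | [] => []
  | r :: rs =>
    (List.range (rs.foldl (fun m q => min m q.length) r.length)).map
      (fun j => (r :: rs).map (fun q => q.getD j default))

-- literal port of A; Python's list()/tuple conversions are identities on Lean lists.
-- Python raises on the inputs excluded by Pre_ below; the getD defaults there are unreachable junk.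
def pad_session_data (X_session_data1 : List (List (List Int))) (X_session_data2 : List (List (List Int))) (X_session_data3 : List (List (List Int))) (X_session_lengths : List (List Int)) : List (List (List Int)) × List (List (List Int)) × List (List (List Int)) :=
  -- int(max([max(_) for _ in X_session_lengths])); ValueError (empty) is excluded by Pre_
  let msl : Int := (PySem.List.max? (X_session_lengths.map (fun r => (PySem.List.max? r (fun y => y)).getD 0)) (fun y => y)).getD 0
  let fillvalue : List Int := List.replicate msl.toNat 0      -- max_session_length*[0]
  let d1 := pyZip (pyZipLongest X_session_data1 fillvalue)
  let d2 := pyZip (pyZipLongest X_session_data2 fillvalue)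
  let d3 := pyZip (pyZipLongest X_session_data3 fillvalue)
  (List.range d1.length).foldl
    (fun acc i =>
      let ps1 := pyZip (pyZipLongest (d1.getD i []) (0 : Int))
      let ps2 := pyZip (pyZipLongest (d2.getD i []) (0 : Int))  -- d2[i]: IndexError out of range, excluded by Pre_
      let ps3 := pyZip (pyZipLongest (d3.getD i []) (0 : Int))
      if (((ps1.getD 0 []).length : Int)) < msl then            -- ps1[0]: IndexError when empty, excluded by Pre_
        let padding := List.replicate (msl - (((ps1.getD 0 []).length : Int))).toNat (0 : Int)
        (acc.1 ++ [ps1.map (fun s => s ++ padding)],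
         acc.2.1 ++ [ps2.map (fun s => s ++ padding)],
         acc.2.2 ++ [ps3.map (fun s => s ++ padding)])
      else
        (acc.1 ++ [ps1], acc.2.1 ++ [ps2], acc.2.2 ++ [ps3]))
    ([], [], [])

-- ===== PORT B =====
def altEven (fill : List Int) (data : List (List (List Int))) : List (List (List Int)) :=
  let num := data.foldl (fun m s => max m s.length) 0
  if num = 0 then []
  else data.map (fun s => s ++ List.replicate (num - s.length) fill)

def altPadSample (sample : List (List Int)) (extra : Nat) : List (List Int) :=
  let localMax := sample.foldl (fun m x => max m x.length) 0
  sample.map (fun x => x ++ List.replicate (localMax - x.length + extra) (0 : Int))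

def pad_session_data_alt (X_session_data1 : List (List (List Int))) (X_session_data2 : List (List (List Int))) (X_session_data3 : List (List (List Int))) (X_session_lengths : List (List Int)) : List (List (List Int)) × List (List (List Int)) × List (List (List Int)) :=
  let msl : Int := (PySem.List.max? (X_session_lengths.map (fun r => (PySem.List.max? r (fun y => y)).getD 0)) (fun y => y)).getD 0
  let fill : List Int := List.replicate msl.toNat 0
  let p1 := altEven fill X_session_data1
  let p2 := altEven fill X_session_data2
  let p3 := altEven fill X_session_data3
  (p1.zip (p2.zip p3)).foldl
    (fun acc t =>
      let extra : Nat := (msl - ((t.1.foldl (fun m x => max m x.length) 0 : Nat) : Int)).toNat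
      (acc.1 ++ [altPadSample t.1 extra],
       acc.2.1 ++ [altPadSample t.2.1 extra],
       acc.2.2 ++ [altPadSample t.2.2 extra]))
    ([], [], [])

-- ===== PRECONDITION & SPEC =====
-- max session length over all samples / max session count over a stream (shape quantities)
def pvMaxLen {α : Type} : List (List α) → Nat
  | [] => 0
  | x :: t => max x.length (pvMaxLen t)
-- Python's max(max(_) for _ in X_session_lengths) (for nonempty rows; see msl_eq below)
def pvRowMax (r : List Int) : Int := r.foldl max (r.headD 0)
def pvMsl (X_session_lengths : List (List Int)) : Int :=
  (X_session_lengths.map pvRowMax).foldl max ((X_session_lengths.map pvRowMax).headD 0)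
-- sample i of stream d collapses under A's transpose: all its sessions empty and no nonempty fill session added
def pvVanish (d : List (List (List Int))) (msl : Int) (i : Nat) : Prop :=
  (∀ x ∈ d.getD i [], x = []) ∧ (pvMaxLen d ≤ (d.getD i []).length ∨ msl ≤ 0)

-- Pre_ excludes exactly the inputs where Python A raises: ValueError (empty X_session_lengths or an
-- empty row in it), and — when stream 1 has a nonempty sample — IndexError (stream 2 or 3 shorter
-- than stream 1, all its samples empty, or a stream-1 sample whose padded sessions are all empty).
def Pre_pad_session_data (X_session_data1 : List (List (List Int))) (X_session_data2 : List (List (List Int))) (X_session_data3 : List (List (List Int))) (X_session_lengths : List (List Int)) : Prop :=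
  X_session_lengths ≠ [] ∧ (∀ r ∈ X_session_lengths, r ≠ []) ∧
  (pvMaxLen X_session_data1 = 0 ∨
    (X_session_data1.length ≤ X_session_data2.length ∧ X_session_data1.length ≤ X_session_data3.length ∧
     pvMaxLen X_session_data2 ≠ 0 ∧ pvMaxLen X_session_data3 ≠ 0 ∧
     ∀ i < X_session_data1.length, ¬ pvVanish X_session_data1 (pvMsl X_session_lengths) i))
instance (X_session_data1 : List (List (List Int))) (X_session_data2 : List (List (List Int))) (X_session_data3 : List (List (List Int))) (X_session_lengths : List (List Int)) : Decidable (Pre_pad_session_data X_session_data1 X_session_data2 X_session_data3 X_session_lengths) := by unfold Pre_pad_session_data pvVanish; infer_instance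

def pvWitness_pad_session_data : List (List (List Int)) × List (List (List Int)) × List (List (List Int)) × List (List Int) :=
  ([[[1]]], [[[1]]], [[[1]]], [[1]])

-- On batch samples of stream 2 or 3 whose sessions are all empty and that receive no fill session
-- (full session count, or non-positive max session length), A silently collapses the sample to [],
-- dropping its sessions; B keeps one zero-padded row per session, the intended uniform shape.
def D_pad_session_data (X_session_data1 : List (List (List Int))) (X_session_data2 : List (List (List Int))) (X_session_data3 : List (List (List Int))) (X_session_lengths : List (List Int)) : Prop :=
  pvMaxLen X_session_data1 ≠ 0 ∧
  ∃ i < X_session_data1.length,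
    (pvVanish X_session_data2 (pvMsl X_session_lengths) i ∨ pvVanish X_session_data3 (pvMsl X_session_lengths) i)
instance (X_session_data1 : List (List (List Int))) (X_session_data2 : List (List (List Int))) (X_session_data3 : List (List (List Int))) (X_session_lengths : List (List Int)) : Decidable (D_pad_session_data X_session_data1 X_session_data2 X_session_data3 X_session_lengths) := by unfold D_pad_session_data pvVanish; infer_instance

def Spec_pad_session_data (X_session_data1 : List (List (List Int))) (X_session_data2 : List (List (List Int))) (X_session_data3 : List (List (List Int))) (X_session_lengths : List (List Int)) (out : List (List (List Int)) × List (List (List Int)) × List (List (List Int))) : Prop := ¬ D_pad_session_data X_session_data1 X_session_data2 X_session_data3 X_session_lengths → out = pad_session_data_alt X_session_data1 X_session_data2 X_session_data3 X_session_lengths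
instance (X_session_data1 : List (List (List Int))) (X_session_data2 : List (List (List Int))) (X_session_data3 : List (List (List Int))) (X_session_lengths : List (List Int)) (out : List (List (List Int)) × List (List (List Int)) × List (List (List Int))) : Decidable (Spec_pad_session_data X_session_data1 X_session_data2 X_session_data3 X_session_lengths out) := by unfold Spec_pad_session_data; infer_instance

def pvDiffWitness_pad_session_data : List (List (List Int)) × List (List (List Int)) × List (List (List Int)) × List (List Int) :=
  ([[[1]]], [[[]]], [[[1]]], [[1]])
def pvDiffWitnessOut_pad_session_data : (List (List (List Int)) × List (List (List Int)) × List (List (List Int))) × (List (List (List Int)) × List (List (List Int)) × List (List (List Int))) :=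
  (([[[1]]], [[]], [[[1]]]), ([[[1]]], [[[]]], [[[1]]]))

-- ===== CLAIM (what is proved, stated in full; the proofs are below) =====
def Claim_unchanged_pad_session_data : Prop := ∀ (X_session_data1 : List (List (List Int))) (X_session_data2 : List (List (List Int))) (X_session_data3 : List (List (List Int))) (X_session_lengths : List (List Int)), Dom_pad_session_data X_session_data1 X_session_data2 X_session_data3 X_session_lengths → Pre_pad_session_data X_session_data1 X_session_data2 X_session_data3 X_session_lengths → Spec_pad_session_data X_session_data1 X_session_data2 X_session_data3 X_session_lengths (pad_session_data X_session_data1 X_session_data2 X_session_data3 X_session_lengths)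
def Claim_changed_pad_session_data : Prop := Dom_pad_session_data (pvDiffWitness_pad_session_data.1) (pvDiffWitness_pad_session_data.2.1) (pvDiffWitness_pad_session_data.2.2.1) (pvDiffWitness_pad_session_data.2.2.2) ∧ Pre_pad_session_data (pvDiffWitness_pad_session_data.1) (pvDiffWitness_pad_session_data.2.1) (pvDiffWitness_pad_session_data.2.2.1) (pvDiffWitness_pad_session_data.2.2.2) ∧ D_pad_session_data (pvDiffWitness_pad_session_data.1) (pvDiffWitness_pad_session_data.2.1) (pvDiffWitness_pad_session_data.2.2.1) (pvDiffWitness_pad_session_data.2.2.2) ∧ pad_session_data (pvDiffWitness_pad_session_data.1) (pvDiffWitness_pad_session_data.2.1) (pvDiffWitness_pad_session_data.2.2.1) (pvDiffWitness_pad_session_data.2.2.2) = pvDiffWitnessOut_pad_session_data.1 ∧ pad_session_data_alt (pvDiffWitness_pad_session_data.1) (pvDiffWitness_pad_session_data.2.1) (pvDiffWitness_pad_session_data.2.2.1) (pvDiffWitness_pad_session_data.2.2.2) = pvDiffWitnessOut_pad_session_data.2 ∧ pvDiffWitnessOut_pad_session_data.1 ≠ pvDiffWitnessOut_pad_sessi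on_data.2
def Claim_exact_pad_session_data : Prop := ∀ (X_session_data1 : List (List (List Int))) (X_session_data2 : List (List (List Int))) (X_session_data3 : List (List (List Int))) (X_session_lengths : List (List Int)), Dom_pad_session_data X_session_data1 X_session_data2 X_session_data3 X_session_lengths → Pre_pad_session_data X_session_data1 X_session_data2 X_session_data3 X_session_lengths → D_pad_session_data X_session_data1 X_session_data2 X_session_data3 X_session_lengths → pad_session_data X_session_data1 X_session_data2 X_session_data3 X_session_lengths ≠ pad_session_data_alt X_session_data1 X_session_data2 X_session_data3 X_session_lengths

-- ===== LEMMAS AND PROOFS =====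

lemma foldl_max_eq_pvMaxLen {α : Type} (l : List (List α)) (a : Nat) :
    l.foldl (fun m x => max m x.length) a = max a (pvMaxLen l) := by
  induction l generalizing a with
  | nil => simp [pvMaxLen]
  | cons x t ih =>
    simp only [List.foldl_cons, ih, pvMaxLen]
    omega

lemma foldl_max_zero_eq {α : Type} (l : List (List α)) :
    l.foldl (fun m x => max m x.length) 0 = pvMaxLen l := by
  rw [foldl_max_eq_pvMaxLen]
  omega

-- the ports' int(max([max(_) for _ in XL])) equals pvMsl on the inputs where Python does not raise
lemma msl_eq (XL : List (List Int)) (hXL : XL ≠ []) (hrows : ∀ r ∈ XL, r ≠ []) :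
    (PySem.List.max? (XL.map (fun r => (PySem.List.max? r (fun y => y)).getD 0)) (fun y => y)).getD 0
      = pvMsl XL := by
  have hmapeq : XL.map (fun r => (PySem.List.max? r (fun y => y)).getD 0) = XL.map pvRowMax := by
    apply List.map_congr_left
    intro r hr
    obtain ⟨x, t, rfl⟩ := List.exists_cons_of_ne_nil (hrows r hr)
    rw [PySem.List.max?_id_cons]
    simp [pvRowMax]
  rw [hmapeq]
  unfold pvMsl
  obtain ⟨r0, rt, rfl⟩ := List.exists_cons_of_ne_nil hXL
  rw [List.map_cons, PySem.List.max?_id_cons]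
  simp

lemma foldl_max_len_zero {α : Type} (l : List (List α)) (a : Nat) (h : ∀ x ∈ l, x = []) :
    l.foldl (fun m x => max m x.length) a = a := by
  induction l generalizing a with
  | nil => rfl
  | cons x t ih =>
    have hx := h x (by simp)
    simp only [List.foldl_cons, hx]
    rw [ih _ (fun y hy => h y (by simp [hy]))]
    simp

lemma pvMaxLen_eq_zero_iff {α : Type} (l : List (List α)) :
    pvMaxLen l = 0 ↔ ∀ x ∈ l, x = [] := by
  constructor
  · intro h x hx
    have := (PySem.List.le_foldl_max_nat l List.length 0).2 x hx
    rw [foldl_max_zero_eq, h] at this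
    simpa using this
  · intro h
    rw [← foldl_max_zero_eq]
    exact foldl_max_len_zero l 0 h

lemma length_le_pvMaxLen {α : Type} {l : List (List α)} {x : List α} (hx : x ∈ l) :
    x.length ≤ pvMaxLen l :=
  foldl_max_zero_eq l ▸ (PySem.List.le_foldl_max_nat l List.length 0).2 x hx

lemma foldl_min_const {α : Type} (l : List (List α)) (c : Nat) (h : ∀ q ∈ l, q.length = c) :
    l.foldl (fun m q => min m q.length) c = c := by
  induction l with
  | nil => rfl
  | cons q t ih =>
    have hq := h q (by simp)
    simp only [List.foldl_cons, hq, min_self]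
    exact ih (fun y hy => h y (by simp [hy]))

lemma map_range_getD {α : Type} (r : List α) (fv : α) (N : Nat) (h : r.length ≤ N) :
    (List.range N).map (fun i => r.getD i fv) = r ++ List.replicate (N - r.length) fv := by
  induction r generalizing N with
  | nil => simp [List.map_const']
  | cons a t ih =>
    cases N with
    | zero => simp at h
    | succ k =>
      rw [List.range_succ_eq_map, List.map_cons, List.map_map]
      simp only [List.getD_cons_zero]
      have : ((fun i => (a :: t).getD i fv) ∘ Nat.succ) = (fun i => t.getD i fv) := by
        funext i; simp
      rw [this, ih k (by simpa using h)]
      simp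

-- A's double transpose, characterised: pad every row to the maximal length, or [] if all rows are empty
lemma pyZip_pyZipLongest {α : Type} [Inhabited α] (data : List (List α)) (fv : α) :
    pyZip (pyZipLongest data fv) =
      if pvMaxLen data = 0 then []
      else data.map (fun r => r ++ List.replicate (pvMaxLen data - r.length) fv) := by
  have hfold : data.foldl (fun m r => max m r.length) 0 = pvMaxLen data := foldl_max_zero_eq data
  unfold pyZipLongest
  rw [hfold]
  cases hN : pvMaxLen data with
  | zero => simp [pyZip]
  | succ k =>
    rw [List.range_succ_eq_map, List.map_cons, List.map_map]
    simp only [pyZip]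
    rw [show (List.map (fun r => r.getD 0 fv) data).length = data.length from by simp]
    rw [foldl_min_const _ data.length (by
      intro q hq
      obtain ⟨j, _, rfl⟩ := List.mem_map.mp hq
      simp)]
    rw [if_neg (by omega)]
    apply List.ext_getElem
    · simp
    · intro j hj hj'
      simp only [List.length_map, List.length_range] at hj hj'
      simp only [List.getElem_map, List.getElem_range]
      have hmem : data[j] ∈ data := List.getElem_mem hj'
      rw [← map_range_getD data[j] fv (k+1) (by have := length_le_pvMaxLen hmem; omega)]
      rw [List.range_succ_eq_map, List.map_cons, List.map_cons, List.map_map, List.map_map]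
      congr 1
      · rw [List.getD_eq_getElem _ _ (by simpa using hj')]
        simp
      · apply List.map_congr_left
        intro i _
        simp only [Function.comp_apply]
        rw [List.getD_eq_getElem _ _ (by simpa using hj')]
        simp

-- max length of a sample after count-padding is 0 exactly on pvVanish-shaped samples
lemma pvMaxLen_even_eq_zero_iff (sample : List (List Int)) (cnt : Nat) (msl : Int) :
    pvMaxLen (sample ++ List.replicate (cnt - sample.length) (List.replicate msl.toNat (0:Int))) = 0
      ↔ ((∀ x ∈ sample, x = []) ∧ (cnt ≤ sample.length ∨ msl ≤ 0)) := by
  rw [pvMaxLen_eq_zero_iff]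
  constructor
  · intro h
    refine ⟨fun x hx => h x (List.mem_append_left _ hx), ?_⟩
    by_cases hc : cnt ≤ sample.length
    · exact Or.inl hc
    · right
      have he : List.replicate msl.toNat (0:Int) = [] :=
        h _ (List.mem_append_right _ (List.mem_replicate.mpr ⟨by omega, rfl⟩))
      have h0 : msl.toNat = 0 := by simpa using congrArg List.length he
      omega
  · rintro ⟨h1, h2⟩ x hx
    rcases List.mem_append.mp hx with hx | hx
    · exact h1 x hx
    · have hm := List.mem_replicate.mp hx
      rcases h2 with h2 | h2
      · omega
      · rw [hm.2, Int.toNat_of_nonpos h2]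
        rfl

lemma foldl_triple_append {β γ : Type} (l : List β) (f g h : β → γ) (a b c : List γ) :
    l.foldl (fun acc x => (acc.1 ++ [f x], acc.2.1 ++ [g x], acc.2.2 ++ [h x])) (a, b, c)
      = (a ++ l.map f, b ++ l.map g, c ++ l.map h) := by
  induction l generalizing a b c with
  | nil => simp
  | cons x t ih => simp [List.foldl_cons, ih]

-- one iteration of A's loop, as a function of the (count-padded) samples
def ifstep (msl : Int) (s1 s : List (List Int)) : List (List Int) :=
  if (((pyZip (pyZipLongest s1 (0:Int))).getD 0 []).length : Int) < msl then
    (pyZip (pyZipLongest s (0:Int))).map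
      (fun x => x ++ List.replicate (msl - (((pyZip (pyZipLongest s1 (0:Int))).getD 0 []).length : Int)).toNat (0:Int))
  else pyZip (pyZipLongest s (0:Int))

-- A's loop in map form
lemma padA_general (msl : Int) (d1 d2 d3 : List (List (List Int))) (l : List Nat)
    (a b c : List (List (List Int))) :
    l.foldl (fun acc i =>
        let ps1 := pyZip (pyZipLongest (d1.getD i []) (0 : Int))
        let ps2 := pyZip (pyZipLongest (d2.getD i []) (0 : Int))
        let ps3 := pyZip (pyZipLongest (d3.getD i []) (0 : Int))
        if (((ps1.getD 0 []).length : Int)) < msl then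
          let padding := List.replicate (msl - (((ps1.getD 0 []).length : Int))).toNat (0 : Int)
          (acc.1 ++ [ps1.map (fun s => s ++ padding)],
           acc.2.1 ++ [ps2.map (fun s => s ++ padding)],
           acc.2.2 ++ [ps3.map (fun s => s ++ padding)])
        else (acc.1 ++ [ps1], acc.2.1 ++ [ps2], acc.2.2 ++ [ps3])) (a, b, c)
      = (a ++ l.map (fun i => ifstep msl (d1.getD i []) (d1.getD i [])),
         b ++ l.map (fun i => ifstep msl (d1.getD i []) (d2.getD i [])),
         c ++ l.map (fun i => ifstep msl (d1.getD i []) (d3.getD i []))) := by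
  induction l generalizing a b c with
  | nil => simp
  | cons x t ih =>
    simp only [List.foldl_cons, List.map_cons]
    by_cases hc : (((((pyZip (pyZipLongest (d1.getD x []) (0:Int)))).getD 0 []).length : Int)) < msl
    · rw [if_pos hc, ih]
      simp only [ifstep]
      rw [if_pos hc, if_pos hc, if_pos hc]
      simp [List.append_assoc]
    · rw [if_neg hc, ih]
      simp only [ifstep]
      rw [if_neg hc, if_neg hc, if_neg hc]
      simp [List.append_assoc]

lemma ifstep_of_maxLen_zero (msl : Int) (s1 s : List (List Int)) (h : pvMaxLen s = 0) :
    ifstep msl s1 s = [] := by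
  unfold ifstep
  rw [pyZip_pyZipLongest s (0:Int), if_pos h]
  split <;> simp

-- the per-sample agreement of one A-iteration with B's altPadSample
lemma ifstep_eq_altPadSample (msl : Int) (s1 s : List (List Int))
    (h1ne : s1 ≠ []) (hK1 : pvMaxLen s1 ≠ 0) (hK : pvMaxLen s ≠ 0) :
    ifstep msl s1 s
      = altPadSample s (msl - ((s1.foldl (fun m x => max m x.length) 0 : Nat) : Int)).toNat := by
  have e1 : pyZip (pyZipLongest s1 (0:Int))
      = s1.map (fun r => r ++ List.replicate (pvMaxLen s1 - r.length) (0:Int)) := by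
    rw [pyZip_pyZipLongest, if_neg hK1]
  have e : pyZip (pyZipLongest s (0:Int))
      = s.map (fun r => r ++ List.replicate (pvMaxLen s - r.length) (0:Int)) := by
    rw [pyZip_pyZipLongest, if_neg hK]
  obtain ⟨h0, t1, rfl⟩ := List.exists_cons_of_ne_nil h1ne
  have hlen0 : ((pyZip (pyZipLongest (h0 :: t1) (0:Int))).getD 0 []).length = pvMaxLen (h0 :: t1) := by
    rw [e1]
    simp only [List.map_cons, List.getD_cons_zero, List.length_append, List.length_replicate]
    have : h0.length ≤ pvMaxLen (h0 :: t1) := length_le_pvMaxLen (by simp)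
    omega
  have hfold : (h0 :: t1).foldl (fun m x => max m x.length) 0 = pvMaxLen (h0 :: t1) :=
    foldl_max_zero_eq (h0 :: t1)
  unfold ifstep
  rw [hlen0, hfold, e]
  unfold altPadSample
  rw [foldl_max_zero_eq s]
  by_cases hc : ((pvMaxLen (h0 :: t1) : Int)) < msl
  · rw [if_pos hc, List.map_map]
    apply List.map_congr_left
    intro x hx
    simp only [Function.comp_apply, List.append_assoc, ← List.replicate_add]
  · rw [if_neg hc]
    have : (msl - ((pvMaxLen (h0 :: t1) : Nat) : Int)).toNat = 0 := by omega
    rw [this]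
    simp

-- one component of the outputs agrees at index i when neither sample vanishes
lemma comp_sample_eq (XL : List (List Int)) (X1 Xk : List (List (List Int))) (i : Nat)
    (hi1 : i < X1.length) (hik : i < Xk.length)
    (hv1 : ¬ pvVanish X1 (pvMsl XL) i) (hvk : ¬ pvVanish Xk (pvMsl XL) i) :
    ifstep (pvMsl XL)
        ((X1.map (fun r => r ++ List.replicate (pvMaxLen X1 - r.length) (List.replicate (pvMsl XL).toNat (0:Int)))).getD i [])
        ((Xk.map (fun r => r ++ List.replicate (pvMaxLen Xk - r.length) (List.replicate (pvMsl XL).toNat (0:Int)))).getD i [])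
      = altPadSample (Xk[i] ++ List.replicate (pvMaxLen Xk - Xk[i].length) (List.replicate (pvMsl XL).toNat (0:Int)))
          ((pvMsl XL - (((X1[i] ++ List.replicate (pvMaxLen X1 - X1[i].length) (List.replicate (pvMsl XL).toNat (0:Int))).foldl (fun m x => max m x.length) 0 : Nat) : Int)).toNat) := by
  rw [List.getD_eq_getElem _ _ (by simpa using hi1), List.getD_eq_getElem _ _ (by simpa using hik)]
  simp only [List.getElem_map]
  have hK1 : pvMaxLen (X1[i] ++ List.replicate (pvMaxLen X1 - X1[i].length) (List.replicate (pvMsl XL).toNat (0:Int))) ≠ 0 := by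
    intro hcon
    have h' := (pvMaxLen_even_eq_zero_iff (X1[i]) (pvMaxLen X1) (pvMsl XL)).mp hcon
    apply hv1
    unfold pvVanish
    rw [List.getD_eq_getElem _ _ hi1]
    exact h'
  have hKk : pvMaxLen (Xk[i] ++ List.replicate (pvMaxLen Xk - Xk[i].length) (List.replicate (pvMsl XL).toNat (0:Int))) ≠ 0 := by
    intro hcon
    have h' := (pvMaxLen_even_eq_zero_iff (Xk[i]) (pvMaxLen Xk) (pvMsl XL)).mp hcon
    apply hvk
    unfold pvVanish
    rw [List.getD_eq_getElem _ _ hik]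
    exact h'
  exact ifstep_eq_altPadSample _ _ _ (fun hnil => hK1 (by rw [hnil]; rfl)) hK1 hKk

-- inside D_, A's collapsed [] sample differs from B's n-session sample
lemma exact_aux (XL : List (List Int)) (Xk : List (List (List Int))) (i : Nat)
    (hik : i < Xk.length) (hnk : pvMaxLen Xk ≠ 0) (hv : pvVanish Xk (pvMsl XL) i)
    (s1 : List (List Int)) (e : Nat) :
    ifstep (pvMsl XL) s1
        ((Xk.map (fun r => r ++ List.replicate (pvMaxLen Xk - r.length) (List.replicate (pvMsl XL).toNat (0:Int)))).getD i [])
      ≠ altPadSample (Xk[i] ++ List.replicate (pvMaxLen Xk - Xk[i].length) (List.replicate (pvMsl XL).toNat (0:Int))) e := by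
  have hv' : (∀ x ∈ Xk[i], x = []) ∧ (pvMaxLen Xk ≤ Xk[i].length ∨ pvMsl XL ≤ 0) := by
    unfold pvVanish at hv
    rw [List.getD_eq_getElem _ _ hik] at hv
    exact hv
  have hK : pvMaxLen (Xk[i] ++ List.replicate (pvMaxLen Xk - Xk[i].length) (List.replicate (pvMsl XL).toNat (0:Int))) = 0 :=
    (pvMaxLen_even_eq_zero_iff (Xk[i]) (pvMaxLen Xk) (pvMsl XL)).mpr hv'
  rw [List.getD_eq_getElem _ _ (by simpa using hik)]
  simp only [List.getElem_map]
  rw [ifstep_of_maxLen_zero _ _ _ hK]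
  intro hcon
  have hlen := congrArg List.length hcon
  have hle : Xk[i].length ≤ pvMaxLen Xk := length_le_pvMaxLen (List.getElem_mem hik)
  simp [altPadSample] at hlen
  omega

-- ===== VERDICT (by name: the statement is the Claim_ definition above) =====
theorem pad_session_data_spec : Claim_unchanged_pad_session_data := by
  intro X1 X2 X3 XL _hdom hpre hnd
  obtain ⟨hXL, hrows, hmain⟩ := hpre
  have hA : pad_session_data X1 X2 X3 XL =
      ([] ++ (List.range (pyZip (pyZipLongest X1 (List.replicate (pvMsl XL).toNat (0:Int)))).length).map
          (fun i => ifstep (pvMsl XL)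
            ((pyZip (pyZipLongest X1 (List.replicate (pvMsl XL).toNat (0:Int)))).getD i [])
            ((pyZip (pyZipLongest X1 (List.replicate (pvMsl XL).toNat (0:Int)))).getD i [])),
       [] ++ (List.range (pyZip (pyZipLongest X1 (List.replicate (pvMsl XL).toNat (0:Int)))).length).map
          (fun i => ifstep (pvMsl XL)
            ((pyZip (pyZipLongest X1 (List.replicate (pvMsl XL).toNat (0:Int)))).getD i [])
            ((pyZip (pyZipLongest X2 (List.replicate (pvMsl XL).toNat (0:Int)))).getD i [])),
       [] ++ (List.range (pyZip (pyZipLongest X1 (List.replicate (pvMsl XL).toNat (0:Int)))).length).map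
          (fun i => ifstep (pvMsl XL)
            ((pyZip (pyZipLongest X1 (List.replicate (pvMsl XL).toNat (0:Int)))).getD i [])
            ((pyZip (pyZipLongest X3 (List.replicate (pvMsl XL).toNat (0:Int)))).getD i []))) := by
    rw [← msl_eq XL hXL hrows]
    exact padA_general _ _ _ _ _ [] [] []
  have hB : pad_session_data_alt X1 X2 X3 XL =
      ([] ++ ((altEven (List.replicate (pvMsl XL).toNat (0:Int)) X1).zip
          ((altEven (List.replicate (pvMsl XL).toNat (0:Int)) X2).zip
           (altEven (List.replicate (pvMsl XL).toNat (0:Int)) X3))).map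
          (fun t => altPadSample t.1 ((pvMsl XL - ((t.1.foldl (fun m x => max m x.length) 0 : Nat) : Int)).toNat)),
       [] ++ ((altEven (List.replicate (pvMsl XL).toNat (0:Int)) X1).zip
          ((altEven (List.replicate (pvMsl XL).toNat (0:Int)) X2).zip
           (altEven (List.replicate (pvMsl XL).toNat (0:Int)) X3))).map
          (fun t => altPadSample t.2.1 ((pvMsl XL - ((t.1.foldl (fun m x => max m x.length) 0 : Nat) : Int)).toNat)),
       [] ++ ((altEven (List.replicate (pvMsl XL).toNat (0:Int)) X1).zip
          ((altEven (List.replicate (pvMsl XL).toNat (0:Int)) X2).zip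
           (altEven (List.replicate (pvMsl XL).toNat (0:Int)) X3))).map
          (fun t => altPadSample t.2.2 ((pvMsl XL - ((t.1.foldl (fun m x => max m x.length) 0 : Nat) : Int)).toNat))) := by
    rw [← msl_eq XL hXL hrows]
    exact foldl_triple_append _ _ _ _ [] [] []
  rw [hA, hB]
  simp only [List.nil_append]
  by_cases h1 : pvMaxLen X1 = 0
  · rw [pyZip_pyZipLongest X1, if_pos h1]
    have hE : altEven (List.replicate (pvMsl XL).toNat (0:Int)) X1 = [] := by
      simp only [altEven]
      rw [foldl_max_zero_eq X1, if_pos h1]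
    rw [hE]
    simp
  · rcases hmain with h0 | ⟨h12, h13, hn2, hn3, hnv1⟩
    · exact absurd h0 h1
    have hnv2 : ∀ i < X1.length, ¬ pvVanish X2 (pvMsl XL) i := by
      intro i hi hv
      exact hnd ⟨h1, i, hi, Or.inl hv⟩
    have hnv3 : ∀ i < X1.length, ¬ pvVanish X3 (pvMsl XL) i := by
      intro i hi hv
      exact hnd ⟨h1, i, hi, Or.inr hv⟩
    rw [pyZip_pyZipLongest X1, pyZip_pyZipLongest X2, pyZip_pyZipLongest X3,
        if_neg h1, if_neg hn2, if_neg hn3]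
    have hA1 : altEven (List.replicate (pvMsl XL).toNat (0:Int)) X1
        = X1.map (fun r => r ++ List.replicate (pvMaxLen X1 - r.length) (List.replicate (pvMsl XL).toNat (0:Int))) := by
      simp only [altEven]
      rw [foldl_max_zero_eq X1, if_neg h1]
    have hA2 : altEven (List.replicate (pvMsl XL).toNat (0:Int)) X2
        = X2.map (fun r => r ++ List.replicate (pvMaxLen X2 - r.length) (List.replicate (pvMsl XL).toNat (0:Int))) := by
      simp only [altEven]
      rw [foldl_max_zero_eq X2, if_neg hn2]
    have hA3 : altEven (List.replicate (pvMsl XL).toNat (0:Int)) X3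
        = X3.map (fun r => r ++ List.replicate (pvMaxLen X3 - r.length) (List.replicate (pvMsl XL).toNat (0:Int))) := by
      simp only [altEven]
      rw [foldl_max_zero_eq X3, if_neg hn3]
    rw [hA1, hA2, hA3]
    simp only [Prod.mk.injEq]
    refine ⟨?_, ?_, ?_⟩ <;>
    · apply List.ext_getElem
      · simp [List.length_zip]
        omega
      · intro i hi hi'
        have hiX1 : i < X1.length := by simpa using hi
        have hiX2 : i < X2.length := by omega
        have hiX3 : i < X3.length := by omega
        simp only [List.getElem_map, List.getElem_range, List.getElem_zip]
        first
        | exact comp_sample_eq XL X1 X1 i hiX1 hiX1 (hnv1 i hiX1) (hnv1 i hiX1)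
        | exact comp_sample_eq XL X1 X2 i hiX1 hiX2 (hnv1 i hiX1) (hnv2 i hiX1)
        | exact comp_sample_eq XL X1 X3 i hiX1 hiX3 (hnv1 i hiX1) (hnv3 i hiX1)

theorem pad_session_data_changed : Claim_changed_pad_session_data := by
  unfold Claim_changed_pad_session_data
  refine ⟨by decide, by decide, by decide, by decide, by decide, by decide⟩

theorem pad_session_data_tight : Claim_exact_pad_session_data := by
  intro X1 X2 X3 XL _hdom hpre hD heq
  obtain ⟨hXL, hrows, hmain⟩ := hpre
  obtain ⟨h1, i, hi, hv⟩ := hD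
  rcases hmain with h0 | ⟨h12, h13, hn2, hn3, hnv1⟩
  · exact h1 h0
  have hA : pad_session_data X1 X2 X3 XL =
      ([] ++ (List.range (pyZip (pyZipLongest X1 (List.replicate (pvMsl XL).toNat (0:Int)))).length).map
          (fun i => ifstep (pvMsl XL)
            ((pyZip (pyZipLongest X1 (List.replicate (pvMsl XL).toNat (0:Int)))).getD i [])
            ((pyZip (pyZipLongest X1 (List.replicate (pvMsl XL).toNat (0:Int)))).getD i [])),
       [] ++ (List.range (pyZip (pyZipLongest X1 (List.replicate (pvMsl XL).toNat (0:Int)))).length).map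
          (fun i => ifstep (pvMsl XL)
            ((pyZip (pyZipLongest X1 (List.replicate (pvMsl XL).toNat (0:Int)))).getD i [])
            ((pyZip (pyZipLongest X2 (List.replicate (pvMsl XL).toNat (0:Int)))).getD i [])),
       [] ++ (List.range (pyZip (pyZipLongest X1 (List.replicate (pvMsl XL).toNat (0:Int)))).length).map
          (fun i => ifstep (pvMsl XL)
            ((pyZip (pyZipLongest X1 (List.replicate (pvMsl XL).toNat (0:Int)))).getD i [])
            ((pyZip (pyZipLongest X3 (List.replicate (pvMsl XL).toNat (0:Int)))).getD i []))) := by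
    rw [← msl_eq XL hXL hrows]
    exact padA_general _ _ _ _ _ [] [] []
  have hB : pad_session_data_alt X1 X2 X3 XL =
      ([] ++ ((altEven (List.replicate (pvMsl XL).toNat (0:Int)) X1).zip
          ((altEven (List.replicate (pvMsl XL).toNat (0:Int)) X2).zip
           (altEven (List.replicate (pvMsl XL).toNat (0:Int)) X3))).map
          (fun t => altPadSample t.1 ((pvMsl XL - ((t.1.foldl (fun m x => max m x.length) 0 : Nat) : Int)).toNat)),
       [] ++ ((altEven (List.replicate (pvMsl XL).toNat (0:Int)) X1).zip
          ((altEven (List.replicate (pvMsl XL).toNat (0:Int)) X2).zip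
           (altEven (List.replicate (pvMsl XL).toNat (0:Int)) X3))).map
          (fun t => altPadSample t.2.1 ((pvMsl XL - ((t.1.foldl (fun m x => max m x.length) 0 : Nat) : Int)).toNat)),
       [] ++ ((altEven (List.replicate (pvMsl XL).toNat (0:Int)) X1).zip
          ((altEven (List.replicate (pvMsl XL).toNat (0:Int)) X2).zip
           (altEven (List.replicate (pvMsl XL).toNat (0:Int)) X3))).map
          (fun t => altPadSample t.2.2 ((pvMsl XL - ((t.1.foldl (fun m x => max m x.length) 0 : Nat) : Int)).toNat))) := by
    rw [← msl_eq XL hXL hrows]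
    exact foldl_triple_append _ _ _ _ [] [] []
  rw [hA, hB] at heq
  rw [pyZip_pyZipLongest X1, pyZip_pyZipLongest X2, pyZip_pyZipLongest X3,
      if_neg h1, if_neg hn2, if_neg hn3] at heq
  have hA1 : altEven (List.replicate (pvMsl XL).toNat (0:Int)) X1
      = X1.map (fun r => r ++ List.replicate (pvMaxLen X1 - r.length) (List.replicate (pvMsl XL).toNat (0:Int))) := by
    simp only [altEven]
    rw [foldl_max_zero_eq X1, if_neg h1]
  have hA2 : altEven (List.replicate (pvMsl XL).toNat (0:Int)) X2
      = X2.map (fun r => r ++ List.replicate (pvMaxLen X2 - r.length) (List.replicate (pvMsl XL).toNat (0:Int))) := by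
    simp only [altEven]
    rw [foldl_max_zero_eq X2, if_neg hn2]
  have hA3 : altEven (List.replicate (pvMsl XL).toNat (0:Int)) X3
      = X3.map (fun r => r ++ List.replicate (pvMaxLen X3 - r.length) (List.replicate (pvMsl XL).toNat (0:Int))) := by
    simp only [altEven]
    rw [foldl_max_zero_eq X3, if_neg hn3]
  rw [hA1, hA2, hA3] at heq
  simp only [List.nil_append] at heq
  have hiX2 : i < X2.length := by omega
  have hiX3 : i < X3.length := by omega
  rcases hv with hv2 | hv3
  · have hcomp := congrArg (fun p => p.2.1) heq
    simp only [] at hcomp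
    have helem := congrArg (fun l => l.getD i ([] : List (List Int))) hcomp
    simp only [] at helem
    rw [List.getD_eq_getElem _ _ (by simpa using hi),
        List.getD_eq_getElem _ _ (by simp [List.length_zip]; omega)] at helem
    simp only [List.getElem_map, List.getElem_range, List.getElem_zip] at helem
    exact exact_aux XL X2 i hiX2 hn2 hv2 _ _ helem
  · have hcomp := congrArg (fun p => p.2.2) heq
    simp only [] at hcomp
    have helem := congrArg (fun l => l.getD i ([] : List (List Int))) hcomp
    simp only [] at helem
    rw [List.getD_eq_getElem _ _ (by simpa using hi),
        List.getD_eq_getElem _ _ (by simp [List.length_zip]; omega)] at helem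
    simp only [List.getElem_map, List.getElem_range, List.getElem_zip] at helem
    exact exact_aux XL X3 i hiX3 hn3 hv3 _ _ helem
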